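-- pv_equiv track=rewrite | github.com/nikhildagarwal/Notepad_app | scripts/add_password.py | check_not_valid
-- ===== SOURCE A (Python) =====
-- def check_not_valid(str1, str2):
--     max_num = 0
--     for char in str1:
--         num = ord(char)
--         if num > max_num:
--             max_num = num
--     for char in str2:
--         num = ord(char)
--         if num > max_num:
--             max_num = num
--     if max_num >= 123:
--         return True
--     return False
-- ===== SOURCE B (Python) =====
-- def check_not_valid(str1, str2):
--     return any(ord(c) >= 123 for c in str1) or any(ord(c) >= 123 for c in str2)
-- ===== Notes on version B (the rewrite author's own statement) =====
-- stated objective: simpler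
-- what changed: B drops the running maximum entirely and short-circuits with any(): it returns True as soon as a character with ord >= 123 is seen, instead of folding all characters into a max and comparing it to 123 at the end.
import Mathlib
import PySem

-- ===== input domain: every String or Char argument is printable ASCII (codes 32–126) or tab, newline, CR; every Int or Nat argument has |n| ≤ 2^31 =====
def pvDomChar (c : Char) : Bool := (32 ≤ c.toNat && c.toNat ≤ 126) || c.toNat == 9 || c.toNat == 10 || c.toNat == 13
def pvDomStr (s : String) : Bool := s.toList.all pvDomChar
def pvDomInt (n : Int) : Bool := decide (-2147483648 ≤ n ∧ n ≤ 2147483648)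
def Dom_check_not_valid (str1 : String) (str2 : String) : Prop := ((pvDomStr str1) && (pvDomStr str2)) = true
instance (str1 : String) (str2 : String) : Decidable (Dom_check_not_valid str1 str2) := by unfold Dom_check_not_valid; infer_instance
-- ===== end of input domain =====

-- B replaces A's fold-to-a-maximum with a short-circuiting any() threshold test; objective: simpler.

-- ===== PORT A =====
-- A: fold over both strings keeping a running max of ord(char), then compare with 123.
def pvMaxStep (m : Int) (c : Char) : Int :=
  let num : Int := (c.toNat : Int)
  if num > m then num else m

def check_not_valid (str1 : String) (str2 : String) : Bool :=
  let m1 := str1.toList.foldl pvMaxStep 0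
  let m2 := str2.toList.foldl pvMaxStep m1
  if m2 ≥ 123 then true else false

-- ===== PORT B =====
-- B: any(ord(c) >= 123 for c in str1) or any(… for c in str2)
def check_not_valid_alt (str1 : String) (str2 : String) : Bool :=
  str1.toList.any (fun c => (c.toNat : Int) ≥ 123) || str2.toList.any (fun c => (c.toNat : Int) ≥ 123)

-- ===== PRECONDITION & SPEC =====
def Spec_check_not_valid (str1 : String) (str2 : String) (out : Bool) : Prop := out = check_not_valid_alt str1 str2
instance (str1 : String) (str2 : String) (out : Bool) : Decidable (Spec_check_not_valid str1 str2 out) := by unfold Spec_check_not_valid; infer_instance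

-- ===== CLAIM (what is proved, stated in full; the proofs are below) =====
def Claim_equal_check_not_valid : Prop := ∀ (str1 : String) (str2 : String), Dom_check_not_valid str1 str2 → Spec_check_not_valid str1 str2 (check_not_valid str1 str2)

-- ===== LEMMAS AND PROOFS =====

-- The fold's result reaches 123 iff the accumulator already did or some char's code is ≥ 123.
theorem pv_fold_ge (l : List Char) (m : Int) :
    (l.foldl pvMaxStep m ≥ 123) ↔ (m ≥ 123 ∨ l.any (fun c => (c.toNat : Int) ≥ 123) = true) := by
  induction l generalizing m with
  | nil => simp
  | cons c l ih =>
    simp only [List.foldl_cons, List.any_cons, Bool.or_eq_true, decide_eq_true_eq, pvMaxStep]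
    rw [ih]
    by_cases h : ((c.toNat : Int) > m)
    · rw [if_pos h]
      have hcm : m ≥ 123 → (c.toNat : Int) ≥ 123 := by omega
      tauto
    · rw [if_neg h]
      have hcm : (c.toNat : Int) ≥ 123 → m ≥ 123 := by omega
      tauto

-- ===== VERDICT (by name: the statement is the Claim_ definition above) =====
theorem check_not_valid_spec : Claim_equal_check_not_valid := by
  intro str1 str2 _
  unfold Spec_check_not_valid check_not_valid check_not_valid_alt
  have key : (str2.toList.foldl pvMaxStep (str1.toList.foldl pvMaxStep 0) ≥ 123) ↔
      ((str1.toList.any (fun c => (c.toNat : Int) ≥ 123)) = true ∨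
       (str2.toList.any (fun c => (c.toNat : Int) ≥ 123)) = true) := by
    rw [pv_fold_ge, pv_fold_ge]
    constructor
    · rintro (⟨h | h⟩ | h) <;> first | omega | tauto
    · rintro (h | h) <;> tauto
  simp only []
  split_ifs with h
  · exact ((Bool.or_eq_true _ _).mpr (key.mp h)).symm
  · have h2 := mt key.mpr h
    have ha1 : (str1.toList.any (fun c => (c.toNat : Int) ≥ 123)) = false :=
      Bool.eq_false_iff.mpr (fun hx => h2 (Or.inl hx))
    have ha2 : (str2.toList.any (fun c => (c.toNat : Int) ≥ 123)) = false :=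
      Bool.eq_false_iff.mpr (fun hx => h2 (Or.inr hx))
    rw [ha1, ha2]
    rfl
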